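-- pv_equiv track=rewrite | github.com/jenkintownelectricity/Construction_OS | tools/detail_atlas_normalizer.py | resolve_layers_to_systems
-- ===== SOURCE A (Python) =====
-- def resolve_layers_to_systems(layers: list, layer_map: dict) -> list:
--     """Map DXF layer names to construction system types."""
--     systems = set()
--     for layer in layers:
--         normalized = layer.upper().strip()
--         for key, system in layer_map.items():
--             if key.upper() in normalized:
--                 systems.add(system)
--     return sorted(systems)
-- ===== SOURCE B (Python) =====
-- def resolve_layers_to_systems(layers: list, layer_map: dict) -> list:
--     """Map DXF layer names to construction system types."""
--     # Inverted matching: index systems by uppercased key, then for each distinct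
--     # key length slide a window over each normalized layer and look the window
--     # up in the index, instead of a substring test of every key per layer.
--     index = {}
--     for key, system in layer_map.items():
--         index.setdefault(key.upper(), []).append(system)
--     lengths = {len(k) for k in index}
--     systems = set()
--     for layer in layers:
--         n = layer.upper().strip()
--         for L in lengths:
--             for i in range(len(n) - L + 1):
--                 systems.update(index.get(n[i:i + L], []))
--     return sorted(systems)
-- ===== Notes on version B (the rewrite author's own statement) =====
-- stated objective: faster
-- what changed: Replaces the per-layer substring test of every map key by a precomputed index from uppercased keys to their systems plus, for each distinct key length, a sliding window over each normalized layer that is looked up directly in the hash index.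
import Mathlib
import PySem

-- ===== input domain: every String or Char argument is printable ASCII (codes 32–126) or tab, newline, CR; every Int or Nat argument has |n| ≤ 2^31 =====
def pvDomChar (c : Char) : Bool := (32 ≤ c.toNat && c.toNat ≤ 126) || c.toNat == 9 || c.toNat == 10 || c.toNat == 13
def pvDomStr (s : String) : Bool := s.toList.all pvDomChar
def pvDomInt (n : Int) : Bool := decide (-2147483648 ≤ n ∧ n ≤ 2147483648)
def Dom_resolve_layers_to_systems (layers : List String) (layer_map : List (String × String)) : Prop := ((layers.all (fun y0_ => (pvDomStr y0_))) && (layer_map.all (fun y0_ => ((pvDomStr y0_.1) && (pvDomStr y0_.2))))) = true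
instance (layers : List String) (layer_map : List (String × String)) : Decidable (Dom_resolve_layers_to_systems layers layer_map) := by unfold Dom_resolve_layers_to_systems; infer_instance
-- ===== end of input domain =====

-- B replaces the per-layer substring scan over all map keys by an index keyed on
-- uppercased keys plus a sliding-window lookup per distinct key length over each
-- normalized layer (objective: faster; a timing run measured the speed-up).

-- ===== PORT A =====
def resolve_layers_to_systems (layers : List String) (layer_map : List (String × String)) : List String :=
  let items := (PySem.Dict.ofList layer_map).items
  let systems : PySem.Set String :=
    layers.foldl (fun s layer =>
      let normalized := PySem.Str.strip (PySem.Str.upper layer)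
      items.foldl (fun s kv =>
        if PySem.Str.isIn (PySem.Str.upper kv.1) normalized then PySem.Set.add s kv.2 else s) s)
      PySem.Set.empty
  PySem.List.sorted systems (fun x => x) false

-- ===== PORT B =====
def resolve_layers_to_systems_alt (layers : List String) (layer_map : List (String × String)) : List String :=
  let index : PySem.Dict String (List String) :=
    (PySem.Dict.ofList layer_map).items.foldl
      (fun d kv => d.modify (PySem.Str.upper kv.1) [] (fun l => l ++ [kv.2])) PySem.Dict.empty
  let lengths : PySem.Set Int :=
    index.keys.foldl (fun s k => PySem.Set.add s (PySem.Str.len k)) PySem.Set.empty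
  let systems : PySem.Set String :=
    layers.foldl (fun s layer =>
      let n := PySem.Str.strip (PySem.Str.upper layer)
      lengths.foldl (fun s L =>
        (PySem.List.pyRange 0 (PySem.Str.len n - L + 1)).foldl (fun s i =>
          PySem.Set.update s (index.getD (PySem.Str.slice n (some i) (some (i + L))) [])) s) s)
      PySem.Set.empty
  PySem.List.sorted systems (fun x => x) false

-- ===== PRECONDITION & SPEC =====
def Spec_resolve_layers_to_systems (layers : List String) (layer_map : List (String × String)) (out : List String) : Prop := out = resolve_layers_to_systems_alt layers layer_map
instance (layers : List String) (layer_map : List (String × String)) (out : List String) : Decidable (Spec_resolve_layers_to_systems layers layer_map out) := by unfold Spec_resolve_layers_to_systems; infer_instance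

-- ===== CLAIM (what is proved, stated in full; the proofs are below) =====
def Claim_equal_resolve_layers_to_systems : Prop := ∀ (layers : List String) (layer_map : List (String × String)), Dom_resolve_layers_to_systems layers layer_map → Spec_resolve_layers_to_systems layers layer_map (resolve_layers_to_systems layers layer_map)

-- ===== LEMMAS AND PROOFS =====

-- proof-side names for B's intermediate structures (definitionally the port's terms)
def pvIdx (lm : List (String × String)) : PySem.Dict String (List String) :=
  (PySem.Dict.ofList lm).items.foldl
    (fun d kv => d.modify (PySem.Str.upper kv.1) [] (fun l => l ++ [kv.2])) PySem.Dict.empty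

def pvLens (lm : List (String × String)) : PySem.Set Int :=
  (pvIdx lm).keys.foldl (fun s k => PySem.Set.add s (PySem.Str.len k)) PySem.Set.empty

def pvNorm (layer : String) : String := PySem.Str.strip (PySem.Str.upper layer)

-- membership in a fold whose step grows a set element-wise (hf characterizes one step)
theorem mem_foldl_grow {α β : Type} [BEq β] [LawfulBEq β]
    (f : PySem.Set β → α → PySem.Set β) (P : α → β → Prop)
    (hf : ∀ s e x, x ∈ f s e ↔ x ∈ s ∨ P e x) (l : List α) (s₀ : PySem.Set β) (x : β) :
    x ∈ l.foldl f s₀ ↔ x ∈ s₀ ∨ ∃ e ∈ l, P e x := by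
  induction l generalizing s₀ with
  | nil => simp
  | cons a t ih =>
    simp only [List.foldl_cons, ih, hf, List.mem_cons]
    constructor
    · rintro ((h | h) | ⟨e, he, hp⟩)
      · exact Or.inl h
      · exact Or.inr ⟨a, Or.inl rfl, h⟩
      · exact Or.inr ⟨e, Or.inr he, hp⟩
    · rintro (h | ⟨e, (rfl | he), hp⟩)
      · exact Or.inl (Or.inl h)
      · exact Or.inl (Or.inr hp)
      · exact Or.inr ⟨e, he, hp⟩

theorem nodup_foldl_grow {α β : Type} [BEq β] [LawfulBEq β]
    (f : PySem.Set β → α → PySem.Set β)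
    (hf : ∀ s e, List.Nodup s → List.Nodup (f s e)) (l : List α) (s₀ : PySem.Set β)
    (hs : List.Nodup s₀) : List.Nodup (l.foldl f s₀) := by
  induction l generalizing s₀ with
  | nil => exact hs
  | cons a t ih => exact ih _ (hf _ _ hs)

-- the index built by setdefault/append: membership in a value list
theorem mem_index_getD (l : List (String × String)) (d : PySem.Dict String (List String))
    (k : String) (x : String) :
    x ∈ (l.foldl (fun d kv => d.modify (PySem.Str.upper kv.1) [] (fun v => v ++ [kv.2])) d).getD k []
      ↔ x ∈ d.getD k [] ∨ ∃ kv ∈ l, PySem.Str.upper kv.1 = k ∧ kv.2 = x := by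
  induction l generalizing d with
  | nil => simp
  | cons kv t ih =>
    simp only [List.foldl_cons, ih, List.mem_cons]
    by_cases hk : k = PySem.Str.upper kv.1
    · subst hk
      rw [PySem.Dict.getD_modify_self]
      simp only [List.mem_append, List.mem_singleton]
      constructor
      · rintro ((h | rfl) | ⟨e, he, hu, hx⟩)
        · exact Or.inl h
        · exact Or.inr ⟨kv, Or.inl rfl, rfl, rfl⟩
        · exact Or.inr ⟨e, Or.inr he, hu, hx⟩
      · rintro (h | ⟨e, (rfl | he), hu, hx⟩)
        · exact Or.inl (Or.inl h)
        · exact Or.inl (Or.inr hx.symm)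
        · exact Or.inr ⟨e, he, hu, hx⟩
    · rw [PySem.Dict.getD_modify_of_ne _ _ _ hk]
      constructor
      · rintro (h | ⟨e, he, hu, hx⟩)
        · exact Or.inl h
        · exact Or.inr ⟨e, Or.inr he, hu, hx⟩
      · rintro (h | ⟨e, (rfl | he), hu, hx⟩)
        · exact Or.inl h
        · exact absurd hu.symm hk
        · exact Or.inr ⟨e, he, hu, hx⟩

theorem mem_pvIdx_getD (lm : List (String × String)) (k : String) (x : String) :
    x ∈ (pvIdx lm).getD k []
      ↔ ∃ kv ∈ (PySem.Dict.ofList lm).items, PySem.Str.upper kv.1 = k ∧ kv.2 = x := by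
  unfold pvIdx
  rw [mem_index_getD]
  simp

theorem mem_pvLens (lm : List (String × String)) (L : Int) :
    L ∈ pvLens lm ↔ ∃ kv ∈ (PySem.Dict.ofList lm).items, L = PySem.Str.len (PySem.Str.upper kv.1) := by
  unfold pvLens pvIdx
  have hkeys := PySem.Dict.keys_foldl_modify_key (ν := List String)
    ((PySem.Dict.ofList lm).items) (fun kv => PySem.Str.upper kv.1) []
    (fun _ kv v => v ++ [kv.2]) PySem.Dict.empty
  rw [mem_foldl_grow (f := fun s k => PySem.Set.add s (PySem.Str.len k))
        (P := fun k L => L = PySem.Str.len k)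
        (hf := fun s e x => PySem.Set.mem_add s (PySem.Str.len e) x)]
  simp only [hkeys]
  simp only [PySem.Set.empty, List.not_mem_nil, false_or]
  constructor
  · rintro ⟨k, hk, rfl⟩
    rw [PySem.Set.mem_update] at hk
    simp only [PySem.Dict.keys, List.mem_map] at hk
    rcases hk with h | ⟨kv, hkv, rfl⟩
    · simp [PySem.Dict.empty] at h
    · exact ⟨kv, hkv, rfl⟩
  · rintro ⟨kv, hkv, rfl⟩
    refine ⟨PySem.Str.upper kv.1, ?_, rfl⟩
    rw [PySem.Set.mem_update]
    exact Or.inr (List.mem_map.mpr ⟨kv, hkv, rfl⟩)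

-- infix ↔ an exact window of the layer string
theorem isIn_iff_window (k n : String) :
    PySem.Str.isIn k n = true ↔
      ∃ i ∈ PySem.List.pyRange 0 (PySem.Str.len n - PySem.Str.len k + 1),
        PySem.Str.slice n (some i) (some (i + PySem.Str.len k)) = k := by
  rw [PySem.Str.isIn_iff_infix]
  constructor
  · rintro ⟨s, t, h⟩
    refine ⟨(s.length : Int), ?_, ?_⟩
    · rw [PySem.List.mem_pyRange_one]
      have : n.toList.length = s.length + k.toList.length + t.length := by
        rw [← h]; simp; omega
      simp only [PySem.Str.len_eq]
      omega
    · apply String.toList_inj.mp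
      rw [PySem.Str.toList_slice, PySem.Chars.slice_eq_listSlice,
          PySem.List.slice_toNat n.toList (by positivity)
            (by simp only [PySem.Str.len_eq]; positivity)]
      have h1 : ((s.length : Int) + PySem.Str.len k).toNat = s.length + k.toList.length := by
        simp only [PySem.Str.len_eq]; omega
      have h2 : ((s.length : Int)).toNat = s.length := by omega
      rw [h1, h2, ← h]
      simp
  · rintro ⟨i, hi, hsl⟩
    rw [PySem.List.mem_pyRange_one] at hi
    have h0k : (0 : Int) ≤ PySem.Str.len k := by
      simp only [PySem.Str.len_eq]; positivity
    have := congrArg String.toList hsl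
    rw [PySem.Str.toList_slice, PySem.Chars.slice_eq_listSlice,
        PySem.List.slice_toNat n.toList hi.1 (by omega)] at this
    rw [← this]
    exact ((n.toList.drop i.toNat).take_prefix _).isInfix.trans
      (n.toList.drop_suffix i.toNat).isInfix

-- A's per-layer condition equals B's per-layer condition
theorem layer_cond_iff (lm : List (String × String)) (n x : String) :
    (∃ L ∈ pvLens lm, ∃ i ∈ PySem.List.pyRange 0 (PySem.Str.len n - L + 1),
        x ∈ (pvIdx lm).getD (PySem.Str.slice n (some i) (some (i + L))) [])
      ↔ ∃ kv ∈ (PySem.Dict.ofList lm).items,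
          PySem.Str.isIn (PySem.Str.upper kv.1) n = true ∧ x = kv.2 := by
  constructor
  · rintro ⟨L, hLmem, i, hi, hx⟩
    have hL0 : 0 ≤ L := by
      rcases (mem_pvLens lm L).mp hLmem with ⟨kv, _, rfl⟩
      simp only [PySem.Str.len_eq]; positivity
    rcases (mem_pvIdx_getD lm _ x).mp hx with ⟨kv, hkv, hu, hx2⟩
    refine ⟨kv, hkv, ?_, hx2.symm⟩
    rw [PySem.Str.isIn_iff_infix, hu]
    rw [PySem.List.mem_pyRange_one] at hi
    rw [PySem.Str.toList_slice, PySem.Chars.slice_eq_listSlice,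
        PySem.List.slice_toNat n.toList hi.1 (by omega)]
    exact ((n.toList.drop i.toNat).take_prefix _).isInfix.trans
      (n.toList.drop_suffix i.toNat).isInfix
  · rintro ⟨kv, hkv, hin, rfl⟩
    refine ⟨PySem.Str.len (PySem.Str.upper kv.1), (mem_pvLens lm _).mpr ⟨kv, hkv, rfl⟩, ?_⟩
    obtain ⟨i, hi, hsl⟩ := (isIn_iff_window _ n).mp hin
    exact ⟨i, hi, (mem_pvIdx_getD lm _ _).mpr ⟨kv, hkv, hsl.symm, rfl⟩⟩

-- membership characterizations, one loop level at a time
theorem A_step_mem (n : String) (s : PySem.Set String) (kv : String × String) (x : String) :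
    x ∈ (if PySem.Str.isIn (PySem.Str.upper kv.1) n then PySem.Set.add s kv.2 else s)
      ↔ x ∈ s ∨ (PySem.Str.isIn (PySem.Str.upper kv.1) n = true ∧ x = kv.2) := by
  split_ifs with h
  · rw [PySem.Set.mem_add]; tauto
  · constructor
    · exact fun hs => Or.inl hs
    · rintro (hs | ⟨hin, _⟩)
      · exact hs
      · exact absurd hin h

theorem mem_A_layer (lm : List (String × String)) (n : String) (s : PySem.Set String) (x : String) :
    x ∈ ((PySem.Dict.ofList lm).items).foldl (fun s kv =>
        if PySem.Str.isIn (PySem.Str.upper kv.1) n then PySem.Set.add s kv.2 else s) s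
      ↔ x ∈ s ∨ ∃ kv ∈ (PySem.Dict.ofList lm).items,
          PySem.Str.isIn (PySem.Str.upper kv.1) n = true ∧ x = kv.2 :=
  mem_foldl_grow _ _ (fun s kv x => A_step_mem n s kv x) _ s x

theorem mem_A_systems (layers : List String) (lm : List (String × String)) (x : String) :
    x ∈ layers.foldl (fun s layer =>
        ((PySem.Dict.ofList lm).items).foldl (fun s kv =>
          if PySem.Str.isIn (PySem.Str.upper kv.1) (pvNorm layer) then PySem.Set.add s kv.2 else s) s)
        PySem.Set.empty
      ↔ ∃ layer ∈ layers, ∃ kv ∈ (PySem.Dict.ofList lm).items,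
          PySem.Str.isIn (PySem.Str.upper kv.1) (pvNorm layer) = true ∧ x = kv.2 :=
  (mem_foldl_grow _ _ (fun s layer x => mem_A_layer lm (pvNorm layer) s x)
    layers PySem.Set.empty x).trans (or_iff_right (by simp [PySem.Set.empty]))

theorem mem_B_window (lm : List (String × String)) (n : String) (L : Int)
    (s : PySem.Set String) (x : String) :
    x ∈ (PySem.List.pyRange 0 (PySem.Str.len n - L + 1)).foldl (fun s i =>
        PySem.Set.update s ((pvIdx lm).getD (PySem.Str.slice n (some i) (some (i + L))) [])) s
      ↔ x ∈ s ∨ ∃ i ∈ PySem.List.pyRange 0 (PySem.Str.len n - L + 1),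
          x ∈ (pvIdx lm).getD (PySem.Str.slice n (some i) (some (i + L))) [] :=
  mem_foldl_grow
    (f := fun s i => PySem.Set.update s ((pvIdx lm).getD (PySem.Str.slice n (some i) (some (i + L))) []))
    (P := fun i x => x ∈ (pvIdx lm).getD (PySem.Str.slice n (some i) (some (i + L))) [])
    (fun s _ x => PySem.Set.mem_update s _ x) _ s x

theorem mem_B_layer (lm : List (String × String)) (n : String) (s : PySem.Set String) (x : String) :
    x ∈ (pvLens lm).foldl (fun s L =>
        (PySem.List.pyRange 0 (PySem.Str.len n - L + 1)).foldl (fun s i =>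
          PySem.Set.update s ((pvIdx lm).getD (PySem.Str.slice n (some i) (some (i + L))) [])) s) s
      ↔ x ∈ s ∨ ∃ L ∈ pvLens lm, ∃ i ∈ PySem.List.pyRange 0 (PySem.Str.len n - L + 1),
          x ∈ (pvIdx lm).getD (PySem.Str.slice n (some i) (some (i + L))) [] :=
  mem_foldl_grow _ _ (fun s L x => mem_B_window lm n L s x) _ s x

theorem mem_B_systems (layers : List String) (lm : List (String × String)) (x : String) :
    x ∈ layers.foldl (fun s layer =>
        (pvLens lm).foldl (fun s L =>
          (PySem.List.pyRange 0 (PySem.Str.len (pvNorm layer) - L + 1)).foldl (fun s i =>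
            PySem.Set.update s
              ((pvIdx lm).getD (PySem.Str.slice (pvNorm layer) (some i) (some (i + L))) [])) s) s)
        PySem.Set.empty
      ↔ ∃ layer ∈ layers, ∃ L ∈ pvLens lm,
          ∃ i ∈ PySem.List.pyRange 0 (PySem.Str.len (pvNorm layer) - L + 1),
            x ∈ (pvIdx lm).getD (PySem.Str.slice (pvNorm layer) (some i) (some (i + L))) [] :=
  (mem_foldl_grow _ _ (fun s layer x => mem_B_layer lm (pvNorm layer) s x)
    layers PySem.Set.empty x).trans (or_iff_right (by simp [PySem.Set.empty]))

-- ===== VERDICT (by name: the statement is the Claim_ definition above) =====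
theorem resolve_layers_to_systems_spec : Claim_equal_resolve_layers_to_systems := by
  intro layers layer_map _
  show resolve_layers_to_systems layers layer_map = resolve_layers_to_systems_alt layers layer_map
  unfold resolve_layers_to_systems resolve_layers_to_systems_alt
  simp only []
  apply PySem.List.sorted_eq_sorted_of_perm _ _ _ (fun _ _ h => h)
  refine (List.perm_ext_iff_of_nodup ?_ ?_).mpr ?_
  · exact nodup_foldl_grow _ (fun s layer hs => nodup_foldl_grow _
      (fun s kv hs => by split_ifs; exacts [PySem.Set.nodup_add _ _ hs, hs]) _ _ hs)
      _ _ List.nodup_nil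
  · exact nodup_foldl_grow _ (fun s layer hs => nodup_foldl_grow _
      (fun s L hs => nodup_foldl_grow _
        (fun s i hs => PySem.Set.nodup_update _ _ hs) _ _ hs) _ _ hs)
      _ _ List.nodup_nil
  · intro x
    refine Iff.trans (mem_A_systems layers layer_map x) (Iff.trans ?_ (mem_B_systems layers layer_map x).symm)
    constructor
    · rintro ⟨layer, hl, hc⟩
      exact ⟨layer, hl, (layer_cond_iff layer_map (pvNorm layer) x).mpr hc⟩
    · rintro ⟨layer, hl, hc⟩
      exact ⟨layer, hl, (layer_cond_iff layer_map (pvNorm layer) x).mp hc⟩
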